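-- pv_equiv track=rewrite | github.com/31b4/leetcode | 2107. Number of Unique Flavors After Sharing K Candies/main.py | shareCandies
-- ===== SOURCE A (Python) =====
-- from typing import List
--
-- def shareCandies(candies: List[int], k: int) -> int:
--     d = {}
--     for c in candies[k:]:
--         d[c] = d.get(c, 0) + 1
--
--     res = len(d)
--     for j in range(k, len(candies)):
--         d[candies[j]] -= 1
--         d[candies[j - k]] = d.get(candies[j - k], 0) + 1
--         if d[candies[j]] == 0: d.pop(candies[j])
--         res = max(res, len(d))
--     return res
-- ===== SOURCE B (Python) =====
-- from typing import List
--
-- def shareCandies(candies: List[int], k: int) -> int: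
--     # Count-table + sliding removed-window: track how many flavors still have
--     # candies outside the removed window, instead of rebuilding the remainder dict.
--     total = {}
--     for c in candies:
--         total[c] = total.get(c, 0) + 1
--     window = {}
--     for c in candies[:k]:
--         window[c] = window.get(c, 0) + 1
--     present = 0
--     for f in total:
--         if window.get(f, 0) < total[f]:
--             present += 1
--     res = present
--     for j in range(k, len(candies)):
--         c = candies[j]
--         window[c] = window.get(c, 0) + 1
--         if window[c] == total[c]:
--             present -= 1
--         o = candies[j - k]
--         if window[o] == total[o]:
--             present += 1
--         window[o] -= 1
--         res = max(res, present)
--     return res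
-- ===== Notes on version B (the rewrite author's own statement) =====
-- stated objective: alternative
-- what changed: Instead of maintaining the dict of remaining candies and taking len(d) each step, B precomputes a global count table and the counts of the removed window, and maintains a single integer 'present' (flavors with candies outside the window) updated by threshold comparisons as the window slides.
import Mathlib
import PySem

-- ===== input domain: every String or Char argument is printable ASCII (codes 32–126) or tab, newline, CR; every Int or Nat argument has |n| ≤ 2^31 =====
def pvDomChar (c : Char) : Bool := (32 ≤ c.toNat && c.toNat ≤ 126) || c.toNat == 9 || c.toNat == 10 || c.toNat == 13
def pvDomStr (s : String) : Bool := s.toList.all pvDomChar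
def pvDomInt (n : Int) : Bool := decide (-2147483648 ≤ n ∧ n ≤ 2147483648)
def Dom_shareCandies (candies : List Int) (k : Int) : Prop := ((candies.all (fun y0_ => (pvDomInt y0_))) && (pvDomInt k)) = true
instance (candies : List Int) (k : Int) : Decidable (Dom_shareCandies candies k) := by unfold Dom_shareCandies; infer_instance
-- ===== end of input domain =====

-- B maintains a global count table plus the counts of the removed window and a running
-- integer 'present' (flavors with candies outside the window), instead of A's dict of the
-- remaining candies with len(d) per step; same cost, different bookkeeping (objective: alternative).

-- ===== PORT A =====
-- the body of A's sliding loop (j-th iteration, state = (remaining-candies dict, res))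
def stepA (candies : List Int) (k : Int) (st : PySem.Dict Int Int × Int) (j : Int) :
    PySem.Dict Int Int × Int :=
  let d := st.1
  let cj := PySem.List.pyGetD candies j 0            -- candies[j]   (in range under Pre_)
  let co := PySem.List.pyGetD candies (j - k) 0      -- candies[j-k] (in range under Pre_)
  let d := d.insert cj (d.getD cj 0 - 1)             -- d[candies[j]] -= 1 (key present under Pre_)
  let d := d.insert co (d.getD co 0 + 1)             -- d[candies[j-k]] = d.get(candies[j-k], 0) + 1
  let d := if d.getD cj 0 == 0 then d.erase cj else d  -- if d[candies[j]] == 0: d.pop(candies[j])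
  (d, max st.2 (d.items.length : Int))               -- res = max(res, len(d))

def shareCandies (candies : List Int) (k : Int) : Int :=
  let d0 : PySem.Dict Int Int :=                     -- d = {}; for c in candies[k:]: d[c] = d.get(c,0)+1
    (PySem.List.slice candies (some k) none).foldl
      (fun d c => d.insert c (d.getD c 0 + 1)) PySem.Dict.empty
  ((PySem.List.pyRange k (candies.length : Int)).foldl (stepA candies k)
      (d0, (d0.items.length : Int))).2

-- ===== PORT B =====
-- the body of B's sliding loop (state = (window dict, present, res))
def stepB (candies : List Int) (k : Int) (total : PySem.Dict Int Int)
    (st : PySem.Dict Int Int × Int × Int) (j : Int) : PySem.Dict Int Int × Int × Int :=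
  let w := st.1
  let c := PySem.List.pyGetD candies j 0                    -- c = candies[j]
  let w := w.insert c (w.getD c 0 + 1)                      -- window[c] = window.get(c,0)+1
  let present := if w.getD c 0 == total.getD c 0 then st.2.1 - 1 else st.2.1
  let o := PySem.List.pyGetD candies (j - k) 0              -- o = candies[j-k]
  let present := if w.getD o 0 == total.getD o 0 then present + 1 else present
  let w := w.insert o (w.getD o 0 - 1)                      -- window[o] -= 1
  (w, present, max st.2.2 present)

def shareCandies_alt (candies : List Int) (k : Int) : Int :=
  let total : PySem.Dict Int Int :=                         -- total counts of every flavor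
    candies.foldl (fun d c => d.insert c (d.getD c 0 + 1)) PySem.Dict.empty
  let window : PySem.Dict Int Int :=                        -- counts of the removed window candies[:k]
    (PySem.List.slice candies none (some k)).foldl
      (fun d c => d.insert c (d.getD c 0 + 1)) PySem.Dict.empty
  let present : Int := total.keys.foldl                     -- for f in total: if window.get(f,0) < total[f]: present += 1
      (fun acc f => if window.getD f 0 < total.getD f 0 then acc + 1 else acc) 0
  ((PySem.List.pyRange k (candies.length : Int)).foldl (stepB candies k total)
      (window, present, present)).2.2

-- ===== PRECONDITION & SPEC =====
-- Pre_ excludes exactly the inputs where A raises: for every k < 0 the index candies[j-k]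
-- (or candies[-1] on the empty list) is out of range, so A raises IndexError.
def Pre_shareCandies (candies : List Int) (k : Int) : Prop := 0 ≤ k
instance (candies : List Int) (k : Int) : Decidable (Pre_shareCandies candies k) := by
  unfold Pre_shareCandies; infer_instance

def pvWitness_shareCandies : List Int × Int := ([1, 2, 1, 3], 2)

def Spec_shareCandies (candies : List Int) (k : Int) (out : Int) : Prop := out = shareCandies_alt candies k
instance (candies : List Int) (k : Int) (out : Int) : Decidable (Spec_shareCandies candies k out) := by unfold Spec_shareCandies; infer_instance

-- ===== CLAIM (what is proved, stated in full; the proofs are below) =====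
def Claim_equal_shareCandies : Prop := ∀ (candies : List Int) (k : Int), Dom_shareCandies candies k → Pre_shareCandies candies k → Spec_shareCandies candies k (shareCandies candies k)

-- ===== LEMMAS AND PROOFS =====

-- remc candies k j c = number of candies of flavor c OUTSIDE the removed window
-- candies[j-k:j] (as an Int), at the start of the loop iteration with index j.
def remc (candies : List Int) (k j c : Int) : Int :=
  (candies.count c : Int) - ((candies.take j.toNat).count c : Int)
    + ((candies.take (j - k).toNat).count c : Int)

-- number of distinct flavors with a candy outside the window
def gcount (candies : List Int) (k j : Int) : Int :=
  ((PySem.Set.ofList candies).countP (fun c => decide (0 < remc candies k j c)) : Int)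

-- invariant of A's dict: it maps exactly the flavors with positive remc to their remc
def InvA (candies : List Int) (k j : Int) (d : PySem.Dict Int Int) : Prop :=
  d.keys.Nodup ∧
    ∀ c, d.get? c = if 0 < remc candies k j c then some (remc candies k j c) else none

-- invariant of B's window dict: getD is the count of c inside the window
def InvB (candies : List Int) (k j : Int) (w : PySem.Dict Int Int) : Prop :=
  ∀ c, w.getD c 0 = (candies.count c : Int) - remc candies k j c

lemma count_take_le (l : List Int) (m : Nat) (c : Int) :
    (l.take m).count c ≤ l.count c :=
  (List.take_sublist m l).count_le c

lemma count_take_mono (l : List Int) {a b : Nat} (h : a ≤ b) (c : Int) :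
    (l.take a).count c ≤ (l.take b).count c := by
  have : l.take a = (l.take b).take a := by rw [List.take_take, Nat.min_eq_left h]
  rw [this]
  exact (List.take_sublist a (l.take b)).count_le c

lemma remc_nonneg {candies : List Int} {k j : Int} (hk : 0 ≤ k) (c : Int) :
    0 ≤ remc candies k j c := by
  unfold remc
  have h1 := count_take_le candies j.toNat c
  have h2 := count_take_mono candies (a := (j - k).toNat) (b := j.toNat)
    (by omega) c
  omega

lemma remc_le_count {candies : List Int} {k j : Int} (hk : 0 ≤ k) (c : Int) :
    remc candies k j c ≤ (candies.count c : Int) := by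
  unfold remc
  have h2 := count_take_mono candies (a := (j - k).toNat) (b := j.toNat)
    (by omega) c
  omega

lemma mem_of_remc_pos {candies : List Int} {k j c : Int} (hk : 0 ≤ k)
    (h : 0 < remc candies k j c) : c ∈ candies := by
  have := remc_le_count (candies := candies) (k := k) (j := j) hk c
  have : 0 < candies.count c := by omega
  exact List.count_pos_iff.mp this

lemma count_drop_eq (l : List Int) (m : Nat) (c : Int) :
    ((l.drop m).count c : Int) = (l.count c : Int) - ((l.take m).count c : Int) := by
  have h : l.take m ++ l.drop m = l := List.take_append_drop m l
  have := congrArg (List.count c) h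
  rw [List.count_append] at this
  omega

lemma count_take_succ (l : List Int) {m : Nat} (h : m < l.length) (c : Int) :
    (l.take (m + 1)).count c = (l.take m).count c + (if c = l[m] then 1 else 0) := by
  rw [List.take_add_one, List.count_append]
  have h1 : l[m]? = some l[m] := List.getElem?_eq_getElem h
  rw [h1]
  by_cases h2 : c = l[m] <;> simp [List.count_cons, h2] <;> omega

-- how remc changes when the window slides from [j-k, j) to [j+1-k, j+1)
lemma remc_step {candies : List Int} {k j : Int} (hk : 0 ≤ k) (hkj : k ≤ j)
    (hjn : j < (candies.length : Int)) (c : Int) :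
    remc candies k (j + 1) c =
      remc candies k j c - (if c = candies[j.toNat]'(by omega) then 1 else 0)
        + (if c = candies[(j - k).toNat]'(by omega) then 1 else 0) := by
  unfold remc
  have h1 : (j + 1).toNat = j.toNat + 1 := by omega
  have h2 : (j + 1 - k).toNat = (j - k).toNat + 1 := by omega
  rw [h1, h2, count_take_succ candies (by omega) c, count_take_succ candies (by omega) c]
  push_cast
  split_ifs <;> omega

lemma remc_pos_at_j {candies : List Int} {k j : Int} (hk : 0 ≤ k) (hkj : k ≤ j)
    (hjn : j < (candies.length : Int)) :
    0 < remc candies k j (candies[j.toNat]'(by omega)) := by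
  unfold remc
  have hmem : candies[j.toNat]'(by omega) ∈ candies.drop j.toNat := by
    rw [List.drop_eq_getElem_cons (by omega)]
    exact List.mem_cons_self
  have hpos : 0 < (candies.drop j.toNat).count (candies[j.toNat]'(by omega)) :=
    List.count_pos_iff.mpr hmem
  have hd := count_drop_eq candies j.toNat (candies[j.toNat]'(by omega))
  have h2 := count_take_mono candies (a := (j - k).toNat) (b := j.toNat) (by omega)
    (candies[j.toNat]'(by omega))
  omega

-- ---- countP surgery: change a Bool predicate at one point / at two points ----

lemma countP_one_update {l : List Int} (hl : l.Nodup) {p q : Int → Bool} {c : Int}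
    (hother : ∀ x, x ≠ c → p x = q x) (hcl : c ∈ l) :
    (l.countP p : Int) = (l.countP q : Int)
      + ((if p c then 1 else 0) - (if q c then 1 else 0)) := by
  induction l with
  | nil => cases hcl
  | cons x t ih =>
    rw [List.countP_cons, List.countP_cons]
    by_cases hx : x = c
    · subst hx
      have hnot : x ∉ t := (List.nodup_cons.mp hl).1
      have heq : t.countP p = t.countP q := by
        apply List.countP_congr
        intro a ha
        have hax : a ≠ x := fun h => hnot (h ▸ ha)
        rw [hother a hax]
      rw [heq]
      push_cast
      split_ifs <;> omega
    · have hct : c ∈ t := by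
        rcases List.mem_cons.mp hcl with h | h
        · exact absurd h.symm hx
        · exact h
      have hih := ih (List.nodup_cons.mp hl).2 hct
      rw [hother x hx]
      push_cast at hih ⊢
      split_ifs at hih ⊢ <;> omega

lemma countP_two_update {l : List Int} (hl : l.Nodup) {p q : Int → Bool} {c o : Int}
    (hco : c ≠ o) (hother : ∀ x, x ≠ c → x ≠ o → p x = q x)
    (hcl : c ∈ l) (hol : o ∈ l) :
    (l.countP p : Int) = (l.countP q : Int)
      + ((if p c then 1 else 0) - (if q c then 1 else 0))
      + ((if p o then 1 else 0) - (if q o then 1 else 0)) := by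
  set r : Int → Bool := fun x => if x = o then p x else q x with hr
  have h1 : (l.countP p : Int) = (l.countP r : Int)
      + ((if p c then 1 else 0) - (if r c then 1 else 0)) := by
    apply countP_one_update hl _ hcl
    intro x hx
    by_cases hxo : x = o
    · simp [hr, hxo]
    · simp [hr, hxo, hother x hx hxo]
  have h2 : (l.countP r : Int) = (l.countP q : Int)
      + ((if r o then 1 else 0) - (if q o then 1 else 0)) := by
    apply countP_one_update hl _ hol
    intro x hx
    simp [hr, hx]
  have hrc : r c = q c := by simp [hr, hco]
  have hro : r o = p o := by simp [hr]
  rw [hrc] at h1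
  rw [hro] at h2
  omega

-- ---- Dict.erase lemmas (not in the PySem lemma list) ----

lemma get?_erase (d : PySem.Dict Int Int) (a b : Int) :
    (d.erase a).get? b = if b = a then none else d.get? b := by
  show ((d.items.filter (fun p => !(p.1 == a))).find? (fun p => p.1 == b)).map (·.2)
      = if b = a then (none : Option Int) else (d.items.find? (fun p => p.1 == b)).map (·.2)
  by_cases hba : b = a
  · subst hba
    simp only [if_pos rfl]
    have : (d.items.filter (fun p => !(p.1 == b))).find? (fun p => p.1 == b) = none := by
      rw [List.find?_eq_none]
      intro x hx
      have := List.of_mem_filter hx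
      simp at this ⊢
      exact this
    rw [this]; rfl
  · rw [if_neg hba]
    congr 1
    induction d.items with
    | nil => rfl
    | cons x t ih =>
      by_cases hxa : x.1 = a
      · have h2 : ¬ (x.1 == b) = true := by
          simp only [beq_iff_eq, hxa]
          exact fun h => hba h.symm
        have hfil : List.filter (fun p => !(p.1 == a)) (x :: t)
            = List.filter (fun p => !(p.1 == a)) t := by
          simp [List.filter_cons, hxa]
        rw [hfil, List.find?_cons_of_neg (p := fun (p : Int × Int) => p.1 == b) h2, ih]
      · have hfil : List.filter (fun p => !(p.1 == a)) (x :: t)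
            = x :: List.filter (fun p => !(p.1 == a)) t := by
          simp [List.filter_cons, hxa]
        rw [hfil]
        by_cases hxb : x.1 = b
        · have h2 : (x.1 == b) = true := by simp [hxb]
          rw [List.find?_cons_of_pos (p := fun (p : Int × Int) => p.1 == b) h2, List.find?_cons_of_pos (p := fun (p : Int × Int) => p.1 == b) h2]
        · have h2 : ¬ (x.1 == b) = true := by simp [hxb]
          rw [List.find?_cons_of_neg (p := fun (p : Int × Int) => p.1 == b) h2, List.find?_cons_of_neg (p := fun (p : Int × Int) => p.1 == b) h2, ih]

lemma nodup_keys_erase (d : PySem.Dict Int Int) (a : Int) (h : d.keys.Nodup) :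
    (d.erase a).keys.Nodup := by
  have hsub : (d.erase a).keys.Sublist d.keys :=
    List.Sublist.map _ (List.filter_sublist)
  exact hsub.nodup h

-- ---- size of A's dict from the invariant ----

lemma size_eq_gcount {candies : List Int} {k j : Int} {d : PySem.Dict Int Int}
    (hk : 0 ≤ k) (hInv : InvA candies k j d) : (d.items.length : Int) = gcount candies k j := by
  obtain ⟨hnd, hget⟩ := hInv
  have hkeys : ∀ c, c ∈ d.keys ↔ (0 < remc candies k j c) := by
    intro c
    constructor
    · intro hc
      by_contra hpos
      have : d.get? c = none := by rw [hget c, if_neg hpos]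
      exact (PySem.Dict.get?_eq_none_iff_not_mem_keys d c).mp this hc
    · intro hpos
      by_contra hc
      have := (PySem.Dict.get?_eq_none_iff_not_mem_keys d c).mpr hc
      rw [hget c, if_pos hpos] at this
      cases this
  have hperm : d.keys.Perm ((PySem.Set.ofList candies).filter
      (fun c => decide (0 < remc candies k j c))) := by
    rw [List.perm_ext_iff_of_nodup hnd ((PySem.Set.nodup_ofList candies).filter _)]
    intro a
    rw [hkeys a, List.mem_filter, PySem.Set.mem_ofList]
    constructor
    · intro h; exact ⟨mem_of_remc_pos hk h, by simpa using h⟩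
    · intro h; simpa using h.2
  have hlen : d.items.length = d.keys.length := by
    simp [PySem.Dict.keys]
  rw [hlen, hperm.length_eq]
  unfold gcount
  rw [List.countP_eq_length_filter]

-- ---- the per-step lemmas ----

lemma stepA_correct {candies : List Int} {k j : Int} {d : PySem.Dict Int Int} {res : Int}
    (hk : 0 ≤ k) (hkj : k ≤ j) (hjn : j < (candies.length : Int))
    (hInv : InvA candies k j d) :
    InvA candies k (j + 1) (stepA candies k (d, res) j).1 ∧
      stepA candies k (d, res) j =
        ((stepA candies k (d, res) j).1, max res (gcount candies k (j + 1))) := by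
  have hj0 : 0 ≤ j := le_trans hk hkj
  obtain ⟨hnd, hget⟩ := hInv
  have hgetD : ∀ c, d.getD c 0 = remc candies k j c := by
    intro c
    rw [PySem.Dict.getD_eq_get?_getD, hget c]
    have := remc_nonneg (candies := candies) (j := j) hk c
    split_ifs with h
    · rfl
    · simp
      omega
  have hcjv : PySem.List.pyGetD candies j 0 = candies[j.toNat]'(by omega) :=
    PySem.List.pyGetD_eq_getElem candies 0 hj0 hjn
  have hcov : PySem.List.pyGetD candies (j - k) 0 = candies[(j - k).toNat]'(by omega) :=
    PySem.List.pyGetD_eq_getElem candies 0 (by omega) (by omega)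
  set cj := candies[j.toNat]'(by omega) with hcjdef
  set co := candies[(j - k).toNat]'(by omega) with hcodef
  have hrcj : 0 < remc candies k j cj := remc_pos_at_j hk hkj hjn
  set d2 := (d.insert cj (d.getD cj 0 - 1)).insert co
      ((d.insert cj (d.getD cj 0 - 1)).getD co 0 + 1) with hd2
  have hstep : stepA candies k (d, res) j =
      (if d2.getD cj 0 == 0 then d2.erase cj else d2,
       max res (((if d2.getD cj 0 == 0 then d2.erase cj else d2).items.length : Int))) := by
    simp only [stepA, hcjv, hcov, hd2]
  have hget2 : ∀ x, d2.get? x =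
      if x = co then some ((if co = cj then remc candies k j cj - 1
                            else remc candies k j co) + 1)
      else if x = cj then some (remc candies k j cj - 1)
      else d.get? x := by
    intro x
    rw [hd2, PySem.Dict.get?_insert, PySem.Dict.get?_insert,
        PySem.Dict.getD_insert, hgetD cj, hgetD co]
  have hgd2cj : d2.getD cj 0 =
      if cj = co then (if co = cj then remc candies k j cj - 1
                       else remc candies k j co) + 1
      else remc candies k j cj - 1 := by
    rw [PySem.Dict.getD_eq_get?_getD, hget2 cj]
    split_ifs <;> rfl
  have hnd2 : d2.keys.Nodup := by
    rw [hd2]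
    exact PySem.Dict.nodup_keys_insert _ _ _ (PySem.Dict.nodup_keys_insert _ _ _ hnd)
  by_cases hcoj : co = cj
  · -- the incoming and outgoing candy have the same flavor: the dict is unchanged pointwise
    have hval : d2.getD cj 0 = remc candies k j cj := by
      rw [hgd2cj]
      simp [hcoj]
    have hcond : (d2.getD cj 0 == 0) = false := by
      rw [hval]
      simp only [beq_eq_false_iff_ne, ne_eq]
      omega
    have hInv2 : ∀ x, d2.get? x =
        if 0 < remc candies k (j + 1) x then some (remc candies k (j + 1) x) else none := by
      intro x
      rw [hget2 x]
      have hs := remc_step hk hkj hjn x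
      rw [← hcjdef, ← hcodef, hcoj] at hs
      have hr1 : remc candies k (j + 1) x = remc candies k j x := by
        rw [hs]
        split_ifs <;> omega
      rw [hr1]
      by_cases hx : x = cj
      · have hxco : x = co := by rw [hcoj]; exact hx
        rw [if_pos hxco, if_pos hcoj,
            if_pos (show 0 < remc candies k j x by rw [hx]; exact hrcj), hx]
        congr 1
        omega
      · have hxco : x ≠ co := by rw [hcoj]; exact hx
        rw [if_neg hxco, if_neg hx, hget x]
    refine ⟨?_, ?_⟩
    · rw [hstep]
      simp only [hcond, Bool.false_eq_true, if_false]
      exact ⟨hnd2, hInv2⟩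
    · rw [hstep]
      simp only [hcond, Bool.false_eq_true, if_false]
      have hsz : ((d2.items.length : Int)) = gcount candies k (j + 1) :=
        size_eq_gcount hk ⟨hnd2, hInv2⟩
      rw [hsz]
  · -- distinct flavors
    have hval : d2.getD cj 0 = remc candies k j cj - 1 := by
      rw [hgd2cj, if_neg (fun h => hcoj h.symm)]
    by_cases h1 : remc candies k j cj = 1
    · -- flavor cj disappears from the remainder: A pops it
      have hcond : (d2.getD cj 0 == 0) = true := by
        rw [hval]
        simp only [beq_iff_eq]
        omega
      have hInv2 : ∀ x, (d2.erase cj).get? x =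
          if 0 < remc candies k (j + 1) x then some (remc candies k (j + 1) x) else none := by
        intro x
        rw [get?_erase]
        have hs := remc_step hk hkj hjn x
        rw [← hcjdef, ← hcodef] at hs
        by_cases hx : x = cj
        · rw [if_pos hx]
          have hr0 : remc candies k (j + 1) x = 0 := by
            rw [hs, if_pos hx]
            have hxco : x ≠ co := by rw [hx]; exact fun h => hcoj h.symm
            rw [if_neg hxco, hx]
            omega
          rw [hr0]
          simp
        · rw [if_neg hx, hget2 x, if_neg hx]
          by_cases hxo : x = co
          · rw [if_pos hxo, if_neg hcoj]
            have hrco := remc_nonneg (candies := candies) (j := j) hk co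
            have hr1 : remc candies k (j + 1) x = remc candies k j co + 1 := by
              rw [hs, if_neg hx, if_pos hxo, hxo]
              omega
            rw [hr1, if_pos (by omega)]
          · rw [if_neg hxo, hget x]
            have hr1 : remc candies k (j + 1) x = remc candies k j x := by
              rw [hs, if_neg hx, if_neg hxo]
              omega
            rw [hr1]
      have hnd3 : (d2.erase cj).keys.Nodup := nodup_keys_erase _ _ hnd2
      refine ⟨?_, ?_⟩
      · rw [hstep]
        simp only [hcond, if_true]
        exact ⟨hnd3, hInv2⟩
      · rw [hstep]
        simp only [hcond, if_true]
        have hsz : (((d2.erase cj).items.length : Int)) = gcount candies k (j + 1) :=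
          size_eq_gcount hk ⟨hnd3, hInv2⟩
        rw [hsz]
    · -- flavor cj still present after the slide
      have hcond : (d2.getD cj 0 == 0) = false := by
        rw [hval]
        simp only [beq_eq_false_iff_ne, ne_eq]
        omega
      have hInv2 : ∀ x, d2.get? x =
          if 0 < remc candies k (j + 1) x then some (remc candies k (j + 1) x) else none := by
        intro x
        rw [hget2 x]
        have hs := remc_step hk hkj hjn x
        rw [← hcjdef, ← hcodef] at hs
        by_cases hxo : x = co
        · rw [if_pos hxo, if_neg hcoj]
          have hrco := remc_nonneg (candies := candies) (j := j) hk co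
          have hxcj : x ≠ cj := by rw [hxo]; exact hcoj
          have hr1 : remc candies k (j + 1) x = remc candies k j co + 1 := by
            rw [hs, if_neg hxcj, if_pos hxo, hxo]
            omega
          rw [hr1, if_pos (by omega)]
        · rw [if_neg hxo]
          by_cases hx : x = cj
          · rw [if_pos hx]
            have hr1 : remc candies k (j + 1) x = remc candies k j cj - 1 := by
              rw [hs, if_pos hx, if_neg hxo, hx]
              omega
            rw [hr1, if_pos (by omega)]
          · rw [if_neg hx, hget x]
            have hr1 : remc candies k (j + 1) x = remc candies k j x := by
              rw [hs, if_neg hx, if_neg hxo]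
              omega
            rw [hr1]
      refine ⟨?_, ?_⟩
      · rw [hstep]
        simp only [hcond, Bool.false_eq_true, if_false]
        exact ⟨hnd2, hInv2⟩
      · rw [hstep]
        simp only [hcond, Bool.false_eq_true, if_false]
        have hsz : ((d2.items.length : Int)) = gcount candies k (j + 1) :=
          size_eq_gcount hk ⟨hnd2, hInv2⟩
        rw [hsz]

lemma stepB_correct {candies : List Int} {k j : Int} {total w : PySem.Dict Int Int}
    {present res : Int}
    (hk : 0 ≤ k) (hkj : k ≤ j) (hjn : j < (candies.length : Int))
    (htotal : ∀ c, total.getD c 0 = (candies.count c : Int))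
    (hInv : InvB candies k j w) (hpres : present = gcount candies k j) :
    InvB candies k (j + 1) (stepB candies k total (w, present, res) j).1 ∧
      stepB candies k total (w, present, res) j =
        ((stepB candies k total (w, present, res) j).1,
          gcount candies k (j + 1), max res (gcount candies k (j + 1))) := by
  have hj0 : 0 ≤ j := le_trans hk hkj
  have hcjv : PySem.List.pyGetD candies j 0 = candies[j.toNat]'(by omega) :=
    PySem.List.pyGetD_eq_getElem candies 0 hj0 hjn
  have hcov : PySem.List.pyGetD candies (j - k) 0 = candies[(j - k).toNat]'(by omega) :=
    PySem.List.pyGetD_eq_getElem candies 0 (by omega) (by omega)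
  set cj := candies[j.toNat]'(by omega) with hcjdef
  set co := candies[(j - k).toNat]'(by omega) with hcodef
  have hrcj : 0 < remc candies k j cj := remc_pos_at_j hk hkj hjn
  have hrco : 0 ≤ remc candies k j co := remc_nonneg hk co
  set w1 := w.insert cj (w.getD cj 0 + 1) with hw1
  have hw1get : ∀ x, w1.getD x 0 =
      if x = cj then (candies.count cj : Int) - remc candies k j cj + 1
      else (candies.count x : Int) - remc candies k j x := by
    intro x
    rw [hw1, PySem.Dict.getD_insert, hInv cj, hInv x]
  set p1 := if w1.getD cj 0 == total.getD cj 0 then present - 1 else present with hp1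
  set p2 := if w1.getD co 0 == total.getD co 0 then p1 + 1 else p1 with hp2
  set w2 := w1.insert co (w1.getD co 0 - 1) with hw2
  have hstep : stepB candies k total (w, present, res) j = (w2, p2, max res p2) := by
    simp only [stepB, hcjv, hcov, hw1, hp1, hp2, hw2]
  have hc1 : (w1.getD cj 0 == total.getD cj 0) = decide (remc candies k j cj = 1) := by
    rw [hw1get cj, if_pos rfl, htotal cj]
    by_cases h : remc candies k j cj = 1 <;> simp [h] <;> omega
  have hc2 : (w1.getD co 0 == total.getD co 0) =
      (if co = cj then decide (remc candies k j cj = 1) else decide (remc candies k j co = 0)) := by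
    rw [hw1get co, htotal co]
    by_cases h : co = cj
    · rw [if_pos h, if_pos h, h]
      by_cases h1 : remc candies k j cj = 1 <;> simp [h1] <;> omega
    · rw [if_neg h, if_neg h]
      by_cases h1 : remc candies k j co = 0 <;> simp [h1] <;> omega
  have hmemcj : cj ∈ PySem.Set.ofList candies :=
    (PySem.Set.mem_ofList candies cj).mpr (by rw [hcjdef]; exact List.getElem_mem _)
  have hmemco : co ∈ PySem.Set.ofList candies :=
    (PySem.Set.mem_ofList candies co).mpr (by rw [hcodef]; exact List.getElem_mem _)
  -- the new present equals the distinct-remaining count for the slid window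
  have hp2g : p2 = gcount candies k (j + 1) := by
    rw [hp2, hp1, hc1, hc2, hpres]
    by_cases hcoj : co = cj
    · -- window contents unchanged as a multiset delta: remc is unchanged
      have hgeq : gcount candies k (j + 1) = gcount candies k j := by
        unfold gcount
        congr 1
        apply List.countP_congr
        intro x _
        have hs := remc_step hk hkj hjn x
        rw [← hcjdef, ← hcodef, hcoj] at hs
        have : remc candies k (j + 1) x = remc candies k j x := by
          rw [hs]; split_ifs <;> omega
        rw [this]
      rw [hgeq, if_pos hcoj]
      split_ifs <;> omega
    · rw [if_neg hcoj]
      have hupd := countP_two_update (l := PySem.Set.ofList candies)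
        (PySem.Set.nodup_ofList candies)
        (p := fun c => decide (0 < remc candies k (j + 1) c))
        (q := fun c => decide (0 < remc candies k j c))
        (c := cj) (o := co) (fun h => hcoj h.symm) ?_ hmemcj hmemco
      · have hscj := remc_step hk hkj hjn cj
        rw [← hcjdef, ← hcodef] at hscj
        have hsco := remc_step hk hkj hjn co
        rw [← hcjdef, ← hcodef] at hsco
        rw [if_pos rfl, if_neg (fun h => hcoj h.symm)] at hscj
        rw [if_pos rfl, if_neg hcoj] at hsco
        unfold gcount
        rw [hupd]
        simp only [decide_eq_true_eq]
        rw [hscj, hsco]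
        split_ifs <;> omega
      · intro x hx1 hx2
        have hs := remc_step hk hkj hjn x
        rw [← hcjdef, ← hcodef] at hs
        rw [if_neg hx1, if_neg hx2] at hs
        simp only [decide_eq_decide]
        rw [hs]
        omega
  refine ⟨?_, ?_⟩
  · rw [hstep]
    intro x
    show w2.getD x 0 = _
    rw [hw2, PySem.Dict.getD_insert, hw1get co]
    have hs := remc_step hk hkj hjn x
    rw [← hcjdef, ← hcodef] at hs
    by_cases hxo : x = co
    · rw [if_pos hxo, hs, hxo]
      by_cases hxc : co = cj <;> simp [hxc] <;> omega
    · rw [if_neg hxo, hw1get x, hs]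
      by_cases hxc : x = cj <;> simp [hxc, hxo] <;> omega
  · rw [hstep, hp2g]

-- ---- the loop lemmas ----

lemma loopA {candies : List Int} {k : Int} (hk : 0 ≤ k) :
    ∀ (m : Nat) (j : Int) (d : PySem.Dict Int Int) (res : Int),
      k ≤ j → (candies.length : Int) - j ≤ (m : Int) → InvA candies k j d →
      ((PySem.List.pyRange j (candies.length : Int)).foldl (stepA candies k) (d, res)).2
        = (PySem.List.pyRange j (candies.length : Int)).foldl
            (fun r i => max r (gcount candies k (i + 1))) res := by
  intro m
  induction m with
  | zero =>
    intro j d res hkj hm hInv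
    rw [PySem.List.pyRange_one_eq_nil (by omega)]
    rfl
  | succ m ih =>
    intro j d res hkj hm hInv
    by_cases hjn : (candies.length : Int) ≤ j
    · rw [PySem.List.pyRange_one_eq_nil hjn]
      rfl
    · rw [not_le] at hjn
      rw [PySem.List.pyRange_one_cons (by omega)]
      simp only [List.foldl_cons]
      obtain ⟨hInv', heq⟩ := stepA_correct hk hkj hjn hInv
      rw [heq]
      exact ih (j + 1) _ _ (by omega) (by omega) hInv'

lemma loopB {candies : List Int} {k : Int} {total : PySem.Dict Int Int} (hk : 0 ≤ k)
    (htotal : ∀ c, total.getD c 0 = (candies.count c : Int)) :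
    ∀ (m : Nat) (j : Int) (w : PySem.Dict Int Int) (res : Int),
      k ≤ j → (candies.length : Int) - j ≤ (m : Int) → InvB candies k j w →
      ((PySem.List.pyRange j (candies.length : Int)).foldl (stepB candies k total)
          (w, gcount candies k j, res)).2.2
        = (PySem.List.pyRange j (candies.length : Int)).foldl
            (fun r i => max r (gcount candies k (i + 1))) res := by
  intro m
  induction m with
  | zero =>
    intro j w res hkj hm hInv
    rw [PySem.List.pyRange_one_eq_nil (by omega)]
    rfl
  | succ m ih =>
    intro j w res hkj hm hInv
    by_cases hjn : (candies.length : Int) ≤ j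
    · rw [PySem.List.pyRange_one_eq_nil hjn]
      rfl
    · rw [not_le] at hjn
      rw [PySem.List.pyRange_one_cons (by omega)]
      simp only [List.foldl_cons]
      obtain ⟨hInv', heq⟩ := stepB_correct hk hkj hjn htotal hInv rfl
      rw [heq]
      exact ih (j + 1) _ _ (by omega) (by omega) hInv'

lemma foldl_count_if_prop (p : Int → Prop) [DecidablePred p] (l : List Int) (a : Int) :
    l.foldl (fun acc x => if p x then acc + 1 else acc) a
      = a + (l.countP (fun x => decide (p x)) : Int) := by
  induction l generalizing a with
  | nil => simp
  | cons x t ih =>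
    rw [List.foldl_cons, List.countP_cons]
    by_cases h : p x
    · rw [if_pos h, ih]
      simp only [h, decide_true, if_pos]
      push_cast
      omega
    · rw [if_neg h, ih]
      simp [h]

-- ---- initial states ----

lemma get?_counter (xs : List Int) (c : Int) :
    (PySem.Dict.counter xs).get? c =
      if 0 < xs.count c then some ((xs.count c : Int)) else none := by
  by_cases hmem : c ∈ xs
  · have hpos : 0 < xs.count c := List.count_pos_iff.mpr hmem
    rw [if_pos hpos]
    have hcont : (PySem.Dict.counter xs).contains c = true := by
      rw [PySem.Dict.contains_counter]
      exact List.contains_iff_mem.mpr hmem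
    have hne : (PySem.Dict.counter xs).get? c ≠ none := by
      intro h
      rw [PySem.Dict.get?_eq_none_iff_contains] at h
      rw [h] at hcont; cases hcont
    obtain ⟨v, hv⟩ := Option.ne_none_iff_exists'.mp hne
    have := PySem.Dict.getD_counter xs c
    rw [PySem.Dict.getD_eq_get?_getD, hv] at this
    simp at this
    rw [hv, this]
  · have : xs.count c = 0 := List.count_eq_zero.mpr hmem
    rw [this, if_neg (by omega)]
    rw [PySem.Dict.get?_eq_none_iff_contains, PySem.Dict.contains_counter]
    simpa using hmem

lemma InvA_init {candies : List Int} {k : Int} (hk : 0 ≤ k) :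
    InvA candies k k (PySem.Dict.counter (candies.drop k.toNat)) := by
  constructor
  · exact PySem.Dict.nodup_keys_counter _
  · intro c
    rw [get?_counter]
    have hd := count_drop_eq candies k.toNat c
    have hr : remc candies k k c = ((candies.drop k.toNat).count c : Int) := by
      unfold remc
      have : (k - k).toNat = 0 := by omega
      rw [this]
      simp
      omega
    rw [hr]
    split_ifs with h1 h2 h2 <;> try rfl
    · omega
    · omega

lemma InvB_init {candies : List Int} {k : Int} (hk : 0 ≤ k) :
    InvB candies k k (PySem.Dict.counter (candies.take k.toNat)) := by
  intro c
  rw [PySem.Dict.getD_counter]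
  unfold remc
  have : (k - k).toNat = 0 := by omega
  rw [this]
  simp only [List.take_zero, List.count_nil, Nat.cast_zero, add_zero]
  omega

-- ===== VERDICT (by name: the statement is the Claim_ definition above) =====
theorem shareCandies_spec : Claim_equal_shareCandies := by
  intro candies k _hdom hkpre
  have hk : 0 ≤ k := hkpre
  show shareCandies candies k = shareCandies_alt candies k
  simp only [shareCandies, shareCandies_alt]
  rw [PySem.List.slice_from candies hk, PySem.List.slice_to candies hk,
      PySem.Dict.foldl_insert_getD_add_one_eq_counter,
      PySem.Dict.foldl_insert_getD_add_one_eq_counter,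
      PySem.Dict.foldl_insert_getD_add_one_eq_counter]
  have htotal : ∀ c, (PySem.Dict.counter candies).getD c 0 = (candies.count c : Int) :=
    fun c => PySem.Dict.getD_counter candies c
  have hsize : ((PySem.Dict.counter (candies.drop k.toNat)).items.length : Int)
      = gcount candies k k := size_eq_gcount hk (InvA_init hk)
  have hpres0 : ((PySem.Dict.counter candies).keys.foldl
      (fun acc f => if (PySem.Dict.counter (candies.take k.toNat)).getD f 0
          < (PySem.Dict.counter candies).getD f 0 then acc + 1 else acc) 0)
      = gcount candies k k := by
    rw [PySem.Dict.keys_counter, foldl_count_if_prop]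
    unfold gcount
    have hkk0 : (k - k).toNat = 0 := by omega
    rw [zero_add]
    congr 2
    funext x
    rw [PySem.Dict.getD_counter, PySem.Dict.getD_counter]
    simp only [decide_eq_decide]
    unfold remc
    rw [hkk0]
    simp only [List.take_zero, List.count_nil, Nat.cast_zero, add_zero]
    omega
  rw [hsize, hpres0]
  rw [loopA hk candies.length k _ _ (le_refl k) (by omega) (InvA_init hk),
      loopB hk htotal candies.length k _ _ (le_refl k) (by omega) (InvB_init hk)]
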